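-- pv_equiv track=rewrite | github.com/BARarch/My-Hackerranks | arrayPacker200315.py | arrayPacking
-- ===== SOURCE A (Python) =====
-- def arrayPacking(a):
--     res = 0
--     shift = 0
--
--     for n in a:
--         addr = n << shift
--         res += addr
--         shift += 8
--
--     return res
-- ===== SOURCE B (Python) =====
-- def arrayPacking(a):
--     res = 0
--     for n in reversed(a):
--         res = (res << 8) + n
--     return res
-- ===== Notes on version B (the rewrite author's own statement) =====
-- stated objective: alternative
-- what changed: Replaces the per-element variable shift (n << shift with shift growing by 8) summed into res by a Horner accumulation over the reversed list: res = (res << 8) + n.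
import Mathlib
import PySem

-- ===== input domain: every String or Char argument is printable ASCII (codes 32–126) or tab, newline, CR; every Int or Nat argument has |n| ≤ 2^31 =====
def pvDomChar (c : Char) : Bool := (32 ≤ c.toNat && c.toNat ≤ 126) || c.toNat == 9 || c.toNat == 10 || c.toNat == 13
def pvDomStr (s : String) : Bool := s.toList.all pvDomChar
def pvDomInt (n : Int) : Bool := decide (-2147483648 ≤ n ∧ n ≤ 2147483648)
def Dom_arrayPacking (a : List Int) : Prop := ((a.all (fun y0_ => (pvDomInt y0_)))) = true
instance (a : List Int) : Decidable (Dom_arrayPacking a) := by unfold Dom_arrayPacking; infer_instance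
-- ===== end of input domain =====

-- ===== PORT A =====
-- for-loop over a carrying (res, shift); 'n << shift' ported exactly as n * 2^shift.toNat
-- (shift is always a nonnegative multiple of 8, so toNat is exact)
def arrayPackingLoop : List Int → Int → Int → Int
  | [], res, _ => res
  | n :: t, res, shift => arrayPackingLoop t (res + n * 2 ^ shift.toNat) (shift + 8)

def arrayPacking (a : List Int) : Int := arrayPackingLoop a 0 0

-- ===== PORT B =====
-- Horner over reversed(a): res = (res << 8) + n, i.e. res * 256 + n (exact for << 8)
def arrayPacking_alt (a : List Int) : Int :=
  a.reverse.foldl (fun res n => res * 256 + n) 0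

-- ===== PRECONDITION & SPEC =====
def Spec_arrayPacking (a : List Int) (out : Int) : Prop := out = arrayPacking_alt a
instance (a : List Int) (out : Int) : Decidable (Spec_arrayPacking a out) := by unfold Spec_arrayPacking; infer_instance

-- ===== CLAIM (what is proved, stated in full; the proofs are below) =====
def Claim_equal_arrayPacking : Prop := ∀ (a : List Int), Dom_arrayPacking a → Spec_arrayPacking a (arrayPacking a)

-- ===== LEMMAS AND PROOFS =====

theorem arrayPackingLoop_eq (a : List Int) : ∀ (r : Int) (s : Nat),
    arrayPackingLoop a r (s : Int) = r + 2 ^ s * a.foldr (fun n res => res * 256 + n) 0 := by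
  induction a with
  | nil => intro r s; simp [arrayPackingLoop]
  | cons n t ih =>
    intro r s
    have h8 : ((s : Int) + 8) = ((s + 8 : Nat) : Int) := by push_cast; ring
    simp only [arrayPackingLoop, h8, ih, List.foldr]
    have : ((s : Int)).toNat = s := Int.toNat_natCast s
    rw [this, pow_add]
    ring

-- ===== VERDICT (by name: the statement is the Claim_ definition above) =====
theorem arrayPacking_spec : Claim_equal_arrayPacking := by
  intro a _
  unfold Spec_arrayPacking arrayPacking arrayPacking_alt
  rw [List.foldl_reverse]
  have := arrayPackingLoop_eq a 0 0
  simpa using this
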